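-- pv_equiv track=rewrite | github.com/suiiim/codetest | leetcode/python/daily_question/tuple_with_same_product.py | tupleSameProduct3
-- ===== SOURCE A (Python) =====
-- from typing import List
--
-- def tupleSameProduct3(nums: List[int]) -> int:
--     n = len(nums)
--     prod_to_appear = {}
--     for i in range(n - 1):
--         for j in range(i + 1, n):
--             key = nums[i] * nums[j]
--             prod_to_appear[key] = prod_to_appear.get(key, 0) + 1
--     res = 0
--     for k in prod_to_appear.values():
--         if k >= 2:
--             res += (k * (k - 1) // 2) * 8
--     return res
-- ===== SOURCE B (Python) =====
-- from typing import List
--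
-- def tupleSameProduct3(nums: List[int]) -> int:
--     n = len(nums)
--     prods = []
--     for i in range(n - 1):
--         for j in range(i + 1, n):
--             prods.append(nums[i] * nums[j])
--     prods.sort()
--     res = 0
--     run = 0
--     prev = None
--     for p in prods:
--         if run and p == prev:
--             run += 1
--         else:
--             res += 4 * run * (run - 1)
--             run = 1
--             prev = p
--     res += 4 * run * (run - 1)
--     return res
-- ===== Notes on version B (the rewrite author's own statement) =====
-- stated objective: alternative
-- what changed: B replaces A's hash-map counting (dict of product multiplicities plus a scan over its values) by sort-then-scan: it collects all pair products into a list, sorts it, and accumulates 4*k*(k-1) per maximal run of equal products in one linear sweep, with no dictionary at all.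
import Mathlib
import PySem

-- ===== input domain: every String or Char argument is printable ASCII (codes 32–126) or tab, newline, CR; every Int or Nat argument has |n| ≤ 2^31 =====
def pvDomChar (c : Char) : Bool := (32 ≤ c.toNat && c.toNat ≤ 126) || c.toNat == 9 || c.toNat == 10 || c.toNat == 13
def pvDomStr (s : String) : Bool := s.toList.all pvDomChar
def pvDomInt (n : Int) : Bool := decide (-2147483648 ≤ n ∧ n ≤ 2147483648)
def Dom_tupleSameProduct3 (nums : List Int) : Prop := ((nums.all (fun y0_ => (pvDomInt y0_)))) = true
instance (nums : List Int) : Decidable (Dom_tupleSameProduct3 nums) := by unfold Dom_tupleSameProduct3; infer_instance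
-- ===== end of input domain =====

-- B replaces A's dict-of-counts plus value scan by sort-then-scan over the list of pair products (objective: alternative; return value only — B sorts a local list, not the argument).


-- ===== PORT A =====
def tupleSameProduct3 (nums : List Int) : Int :=
  let n : Int := nums.length
  let prodToAppear : PySem.Dict Int Int :=
    (PySem.List.pyRange 0 (n - 1) 1).foldl (fun d i =>
      (PySem.List.pyRange (i + 1) n 1).foldl (fun d j =>
        let key := PySem.List.pyGetD nums i 0 * PySem.List.pyGetD nums j 0
        d.insert key (d.getD key 0 + 1)) d) PySem.Dict.empty
  prodToAppear.values.foldl (fun res k =>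
    if 2 ≤ k then res + PySem.Int.floordiv (k * (k - 1)) 2 * 8 else res) 0

-- ===== PORT B =====
def tupleSameProduct3_alt (nums : List Int) : Int :=
  let n : Int := nums.length
  let prods : List Int :=
    (PySem.List.pyRange 0 (n - 1) 1).foldl (fun acc i =>
      (PySem.List.pyRange (i + 1) n 1).foldl (fun acc j =>
        acc ++ [PySem.List.pyGetD nums i 0 * PySem.List.pyGetD nums j 0]) acc) []
  let sortedProds : List Int := PySem.List.sorted prods (fun x => x) false
  let st : Int × Int × Option Int :=
    sortedProds.foldl (fun st p =>
      if st.2.1 ≠ 0 ∧ st.2.2 = some p then (st.1, st.2.1 + 1, st.2.2)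
      else (st.1 + 4 * st.2.1 * (st.2.1 - 1), 1, some p)) (0, 0, none)
  st.1 + 4 * st.2.1 * (st.2.1 - 1)

-- ===== PRECONDITION & SPEC =====
def Spec_tupleSameProduct3 (nums : List Int) (out : Int) : Prop := out = tupleSameProduct3_alt nums
instance (nums : List Int) (out : Int) : Decidable (Spec_tupleSameProduct3 nums out) := by unfold Spec_tupleSameProduct3; infer_instance

-- ===== CLAIM (what is proved, stated in full; the proofs are below) =====
def Claim_equal_tupleSameProduct3 : Prop := ∀ (nums : List Int), Dom_tupleSameProduct3 nums → Spec_tupleSameProduct3 nums (tupleSameProduct3 nums)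

-- ===== LEMMAS AND PROOFS =====

-- per-run / per-count contribution
def pvG (k : Int) : Int := 4 * k * (k - 1)

-- per-value contribution in A's second pass
def pvF (k : Int) : Int := if 2 ≤ k then PySem.Int.floordiv (k * (k - 1)) 2 * 8 else 0

theorem pvF_eq_pvG (c : Int) (hc : 0 ≤ c) : pvF c = pvG c := by
  unfold pvF pvG
  split_ifs with h
  · have h2 : (2:Int) ∣ c * (c - 1) := by
      rcases Int.even_mul_succ_self (c - 1) with ⟨m, hm⟩
      exact ⟨m, by linarith [hm]⟩
    rcases h2 with ⟨m, hm⟩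
    rw [hm, PySem.Int.floordiv_eq_ediv_of_pos (by norm_num), Int.mul_ediv_cancel_left _ (by norm_num)]
    linear_combination (-4) * hm
  · interval_cases c <;> norm_num

-- A's second pass over a list of values
theorem pvFoldA_eq_total (l : List Int) (a : Int) :
    l.foldl (fun res k => if 2 ≤ k then res + PySem.Int.floordiv (k * (k - 1)) 2 * 8 else res) a
      = a + (l.map pvF).sum := by
  induction l generalizing a with
  | nil => simp
  | cons x xs ih =>
    simp only [List.foldl_cons, List.map_cons, List.sum_cons, ih]
    unfold pvF
    split_ifs <;> ring

-- the multiset count sum both programs compute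
def pvSumDedup (L : List Int) : Int := ∑ k ∈ L.toFinset, pvG ((L.count k : Int))

-- the nested range loops on each side are a fold over the same flat key list
def pvKeys (nums : List Int) : List Int :=
  ((PySem.List.pyRange 0 ((nums.length : Int) - 1) 1).map (fun i =>
    (PySem.List.pyRange (i + 1) (nums.length : Int) 1).map (fun j =>
      PySem.List.pyGetD nums i 0 * PySem.List.pyGetD nums j 0))).flatten

theorem pvNested_fold {σ : Type} (nums : List Int) (step : σ → Int → σ) (init : σ) :
    (PySem.List.pyRange 0 ((nums.length : Int) - 1) 1).foldl (fun s i =>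
      (PySem.List.pyRange (i + 1) (nums.length : Int) 1).foldl (fun s j =>
        step s (PySem.List.pyGetD nums i 0 * PySem.List.pyGetD nums j 0)) s) init
      = (pvKeys nums).foldl step init := by
  unfold pvKeys
  rw [List.foldl_flatten, List.foldl_map]
  congr 1
  funext s i
  rw [List.foldl_map]

-- A equals the count sum of its flat key list
theorem pvA_eq_sumDedup (L : List Int) :
    ((PySem.Dict.counter L).values.map pvF).sum = pvSumDedup L := by
  have hv : (PySem.Dict.counter L).values
      = (PySem.Set.ofList L).map (fun k => ((L.count k : Int))) := by
    simp only [PySem.Dict.values, PySem.Dict.items_counter, List.map_map]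
    rfl
  rw [hv, List.map_map]
  have h1 : (PySem.Set.ofList L).map (pvF ∘ fun k => ((L.count k : Int)))
      = (PySem.Set.ofList L).map (fun k => pvG ((L.count k : Int))) :=
    List.map_congr_left (fun k _ => pvF_eq_pvG _ (Int.natCast_nonneg _))
  rw [h1]
  unfold pvSumDedup
  have hts : (PySem.Set.ofList L).toFinset = L.toFinset := by
    ext k
    simp [List.mem_toFinset, PySem.Set.mem_ofList]
  rw [← hts, List.sum_toFinset _ (PySem.Set.nodup_ofList L)]

-- unfolding pvSumDedup at a cons cell
theorem pvSumDedup_cons (y : Int) (T : List Int) :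
    pvSumDedup (y :: T) = pvG (1 + (T.count y : Int)) + pvSumDedup (T.filter (fun z => z ≠ y)) := by
  unfold pvSumDedup
  have hft : (T.filter (fun z => z ≠ y)).toFinset = T.toFinset.erase y := by
    ext k
    simp [List.mem_toFinset, Finset.mem_erase, and_comm]
  have hins : (y :: T).toFinset = insert y (T.toFinset.erase y) := by
    ext k
    by_cases hk : k = y <;> simp [hk]
  rw [hins, Finset.sum_insert (Finset.notMem_erase y _), hft]
  congr 1
  · rw [List.count_cons_self]
    push_cast
    ring_nf
  · apply Finset.sum_congr rfl
    intro k hk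
    have hky : k ≠ y := (Finset.mem_erase.mp hk).1
    rw [List.count_cons_of_ne (fun h => hky h.symm),
        List.count_filter (by simp [hky])]

-- B's run-scan step
def pvStepB (st : Int × Int × Option Int) (p : Int) : Int × Int × Option Int :=
  if st.2.1 ≠ 0 ∧ st.2.2 = some p then (st.1, st.2.1 + 1, st.2.2)
  else (st.1 + 4 * st.2.1 * (st.2.1 - 1), 1, some p)

-- the per-key steps of the two nested loops
def pvStepA (d : PySem.Dict Int Int) (k : Int) : PySem.Dict Int Int := d.insert k (d.getD k 0 + 1)
def pvStepL (acc : List Int) (k : Int) : List Int := acc ++ [k]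

-- run-scan invariant over a sorted tail
theorem pvRuns (S : List Int) (hs : S.Pairwise (· ≤ ·)) :
    ∀ (res run x : Int), 1 ≤ run → (∀ y ∈ S, x ≤ y) →
    (S.foldl pvStepB (res, run, some x)).1 + pvG (S.foldl pvStepB (res, run, some x)).2.1
      = res + pvG (run + (S.count x : Int)) + pvSumDedup (S.filter (fun z => z ≠ x)) := by
  induction S with
  | nil =>
    intro res run x hrun hx
    simp [pvSumDedup]
  | cons y T ih =>
    intro res run x hrun hx
    have hyT : ∀ z ∈ T, y ≤ z := (List.pairwise_cons.mp hs).1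
    have hT : T.Pairwise (· ≤ ·) := (List.pairwise_cons.mp hs).2
    by_cases hxy : x = y
    · subst hxy
      simp only [List.foldl_cons, pvStepB]
      rw [if_pos ⟨by omega, by simp⟩]
      rw [ih hT res (run + 1) x (by omega) hyT]
      rw [List.count_cons_self]
      have hfx : (x :: T).filter (fun z => z ≠ x) = T.filter (fun z => z ≠ x) := by
        simp
      rw [hfx]
      push_cast
      ring_nf
    · have hxy' : x < y := lt_of_le_of_ne (hx y (List.mem_cons_self)) hxy
      simp only [List.foldl_cons, pvStepB]
      rw [if_neg (fun h => hxy (Option.some.inj h.2))]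
      rw [ih hT (res + 4 * run * (run - 1)) 1 y (by omega) hyT]
      have hTx : ∀ z ∈ T, x < z := fun z hz => lt_of_lt_of_le hxy' (hyT z hz)
      have hcx : (y :: T).count x = 0 := by
        rw [List.count_eq_zero]
        intro hmem
        rcases List.mem_cons.mp hmem with h | h
        · exact hxy h
        · exact absurd rfl (ne_of_gt (hTx x h))
      have hfT : T.filter (fun z => z ≠ x) = T :=
        List.filter_eq_self.mpr (fun z hz => by simp [ne_of_gt (hTx z hz)])
      have hfx : (y :: T).filter (fun z => z ≠ x) = y :: T := by
        rw [List.filter_cons, if_pos (by simp [Ne.symm hxy])]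
        rw [hfT]
      rw [hcx, hfx, pvSumDedup_cons]
      unfold pvG
      push_cast
      ring_nf

-- run-scan on a whole sorted list
theorem pvRuns_top (S : List Int) (hs : S.Pairwise (· ≤ ·)) :
    (S.foldl pvStepB (0, 0, none)).1 + pvG (S.foldl pvStepB (0, 0, none)).2.1 = pvSumDedup S := by
  cases S with
  | nil => simp [pvG, pvSumDedup]
  | cons y T =>
    have hyT : ∀ z ∈ T, y ≤ z := (List.pairwise_cons.mp hs).1
    have hT : T.Pairwise (· ≤ ·) := (List.pairwise_cons.mp hs).2
    simp only [List.foldl_cons, pvStepB]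
    rw [if_neg (by simp)]
    have hst : ((0 : Int) + 4 * 0 * (0 - 1), (1 : Int), some y) = ((0 : Int), (1 : Int), some y) := by
      norm_num
    rw [hst, pvRuns T hT 0 1 y (by omega) hyT, pvSumDedup_cons]
    ring_nf

-- pvSumDedup only depends on the multiset
theorem pvSumDedup_perm (S L : List Int) (h : S.Perm L) : pvSumDedup S = pvSumDedup L := by
  unfold pvSumDedup
  rw [List.toFinset_eq_of_perm _ _ h]
  exact Finset.sum_congr rfl (fun k _ => by rw [h.count_eq])

-- ===== VERDICT (by name: the statement is the Claim_ definition above) =====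
theorem tupleSameProduct3_spec : Claim_equal_tupleSameProduct3 := by
  intro nums _
  unfold Spec_tupleSameProduct3 tupleSameProduct3 tupleSameProduct3_alt
  have hA := pvNested_fold nums pvStepA PySem.Dict.empty
  have hB := pvNested_fold nums pvStepL []
  unfold pvStepA at hA
  unfold pvStepL at hB
  simp only [] at hA hB ⊢
  rw [hA, hB]
  rw [PySem.Dict.foldl_insert_getD_add_one_eq_counter, pvFoldA_eq_total, pvA_eq_sumDedup]
  rw [PySem.List.foldl_append_singleton, List.nil_append]
  have hs : (PySem.List.sorted (pvKeys nums) (fun x => x) false).Pairwise (· ≤ ·) := by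
    simpa using PySem.List.sorted_pairwise (pvKeys nums) (fun x => x)
  have hRun := pvRuns_top (PySem.List.sorted (pvKeys nums) (fun x => x) false) hs
  unfold pvStepB pvG at hRun
  rw [hRun, pvSumDedup_perm _ _ (PySem.List.sorted_perm (pvKeys nums) (fun x => x) false)]
  ring
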